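-- pv_equiv track=rewrite | github.com/submission-conf/neurips_cooperativeAI | utils.py | name_generic_model_list
-- ===== SOURCE A (Python) =====
-- import string
--
-- def name_generic_model_list(n_agents, ext = '.pth'):
--     alphabet = list(string.ascii_lowercase)
--     list_output = []
--
--     model_name = 'Q_gen_P_a_for_'
--     list_output.append(model_name+'x'+ext)
--     for i in range(n_agents-1):
--         model_name += alphabet[i+1]
--         list_output.append(model_name+ext)
--
--     return list_output
-- ===== SOURCE B (Python) =====
-- import string
--
--
-- def name_generic_model_list(n_agents, ext='.pth'):
--     prefix = 'Q_gen_P_a_for_'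
--     return [prefix + 'x' + ext] + [
--         prefix + string.ascii_lowercase[1:j + 1] + ext
--         for j in range(1, n_agents)
--     ]
-- ===== Notes on version B (the rewrite author's own statement) =====
-- stated objective: alternative
-- what changed: Replaces A's single stateful loop that mutates a growing model_name accumulator with a per-index closed form: element j is prefix + ascii_lowercase[1:j+1] + ext, each suffix obtained independently by slicing the alphabet, with no running state.
import Mathlib
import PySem

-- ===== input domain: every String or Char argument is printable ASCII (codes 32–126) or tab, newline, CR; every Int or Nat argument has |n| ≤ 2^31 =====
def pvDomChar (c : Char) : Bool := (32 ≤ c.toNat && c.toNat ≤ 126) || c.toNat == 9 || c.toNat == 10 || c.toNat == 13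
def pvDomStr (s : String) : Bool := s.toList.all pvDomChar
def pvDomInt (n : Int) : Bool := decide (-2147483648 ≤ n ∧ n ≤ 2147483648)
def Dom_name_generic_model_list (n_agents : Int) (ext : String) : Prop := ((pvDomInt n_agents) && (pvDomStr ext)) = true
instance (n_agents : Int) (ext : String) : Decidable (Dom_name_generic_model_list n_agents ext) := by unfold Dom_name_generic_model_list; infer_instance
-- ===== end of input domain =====

-- B replaces A's stateful string-accumulator loop by an independent closed form per index (a slice of the alphabet), with no running state; same asymptotic cost.


-- ===== PORT A =====
-- list(string.ascii_lowercase): a list of one-character strings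
def pvAlphabet : List String :=
  ["a","b","c","d","e","f","g","h","i","j","k","l","m",
   "n","o","p","q","r","s","t","u","v","w","x","y","z"]

-- A: single loop mutating model_name and appending to list_output.
-- alphabet[i+1] is PySem.List.pyGet?; '.getD ""' is never reached under Pre_ (Python raises IndexError there).
def name_generic_model_list (n_agents : Int) (ext : String) : List String :=
  let list_output : List String := []
  let model_name := "Q_gen_P_a_for_"
  let list_output := list_output ++ [model_name ++ "x" ++ ext]
  let st := (PySem.List.pyRange 0 (n_agents - 1) 1).foldl
    (fun (st : String × List String) i =>
      let model_name := st.1 ++ (PySem.List.pyGet? pvAlphabet (i + 1)).getD ""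
      (model_name, st.2 ++ [model_name ++ ext]))
    (model_name, list_output)
  st.2

-- ===== PORT B =====
-- B: no accumulator; element j is prefix + ascii_lowercase[1:j+1] + ext, computed independently.
def name_generic_model_list_alt (n_agents : Int) (ext : String) : List String :=
  let pre := "Q_gen_P_a_for_"
  [pre ++ "x" ++ ext] ++
    (PySem.List.pyRange 1 n_agents 1).map
      (fun j => pre ++ PySem.Str.slice "abcdefghijklmnopqrstuvwxyz" (some 1) (some (j + 1)) ++ ext)

-- ===== PRECONDITION & SPEC =====
-- Pre_ excludes exactly n_agents ≥ 27, where A raises IndexError (alphabet[i+1] with i+1 = 26).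
def Pre_name_generic_model_list (n_agents : Int) (ext : String) : Prop := n_agents ≤ 26
instance (n_agents : Int) (ext : String) : Decidable (Pre_name_generic_model_list n_agents ext) := by unfold Pre_name_generic_model_list; infer_instance
def pvWitness_name_generic_model_list : Int × String := (4, ".pth")

def Spec_name_generic_model_list (n_agents : Int) (ext : String) (out : List String) : Prop := out = name_generic_model_list_alt n_agents ext
instance (n_agents : Int) (ext : String) (out : List String) : Decidable (Spec_name_generic_model_list n_agents ext out) := by unfold Spec_name_generic_model_list; infer_instance

-- ===== CLAIM (what is proved, stated in full; the proofs are below) =====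
def Claim_equal_name_generic_model_list : Prop := ∀ (n_agents : Int) (ext : String), Dom_name_generic_model_list n_agents ext → Pre_name_generic_model_list n_agents ext → Spec_name_generic_model_list n_agents ext (name_generic_model_list n_agents ext)

-- ===== LEMMAS AND PROOFS =====

-- the tail of names A's loop produces from current name mn over index list l
def pvPhi (ext : String) : List Int → String → List String
  | [], _ => []
  | i :: t, mn =>
      let mn' := mn ++ (PySem.List.pyGet? pvAlphabet (i + 1)).getD ""
      (mn' ++ ext) :: pvPhi ext t mn'

lemma foldA_eq (ext : String) (l : List Int) :
    ∀ (mn : String) (out : List String),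
    (l.foldl
      (fun (st : String × List String) i =>
        let model_name := st.1 ++ (PySem.List.pyGet? pvAlphabet (i + 1)).getD ""
        (model_name, st.2 ++ [model_name ++ ext]))
      (mn, out)).2 = out ++ pvPhi ext l mn := by
  induction l with
  | nil => simp [pvPhi]
  | cons i t ih =>
      intro mn out
      simp only [List.foldl_cons, pvPhi, ih]
      simp

-- the suffix B computes for element index j = k+1: ascii_lowercase[1:k+2] seen as a function of k
def pvSuf (k : Nat) : String :=
  PySem.Str.slice "abcdefghijklmnopqrstuvwxyz" (some 1) (some ((k : Int) + 1))

lemma suf_step : ∀ k < 25,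
    pvSuf k ++ (PySem.List.pyGet? pvAlphabet ((k : Int) + 1)).getD "" = pvSuf (k + 1) := by
  decide

lemma suf_zero : "Q_gen_P_a_for_" ++ pvSuf 0 = "Q_gen_P_a_for_" := by decide

lemma phi_eq (ext : String) :
    ∀ (m k : Nat), k + m ≤ 25 →
    pvPhi ext ((List.range m).map (fun j : Nat => (k : Int) + (j : Int))) ("Q_gen_P_a_for_" ++ pvSuf k)
      = (List.range m).map (fun j : Nat => "Q_gen_P_a_for_" ++ pvSuf (k + j + 1) ++ ext) := by
  intro m
  induction m with
  | zero => intro k _; simp [pvPhi]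
  | succ m ih =>
      intro k hk
      have hstep : "Q_gen_P_a_for_" ++ pvSuf k
            ++ (PySem.List.pyGet? pvAlphabet ((k : Int) + 1)).getD ""
          = "Q_gen_P_a_for_" ++ pvSuf (k + 1) := by
        rw [String.append_assoc, suf_step k (by omega)]
      rw [List.range_succ_eq_map]
      simp only [List.map_cons, List.map_map, Function.comp_def, pvPhi, List.cons.injEq,
        Nat.cast_zero, add_zero]
      refine ⟨?_, ?_⟩
      · rw [hstep]
      · rw [hstep]
        have hmap : (List.range m).map (fun j : Nat => (k : Int) + ((j + 1 : Nat) : Int))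
            = (List.range m).map (fun j : Nat => ((k + 1 : Nat) : Int) + (j : Int)) := by
          apply List.map_congr_left; intro j _; omega
        rw [hmap, ih (k + 1) (by omega)]
        apply List.map_congr_left; intro j _
        have hj : k + 1 + j + 1 = k + (j + 1) + 1 := by omega
        rw [hj]

-- ===== VERDICT (by name: the statement is the Claim_ definition above) =====
theorem name_generic_model_list_spec : Claim_equal_name_generic_model_list := by
  intro n ext _ hpre
  have h26 : n ≤ 26 := hpre
  unfold Spec_name_generic_model_list name_generic_model_list name_generic_model_list_alt
  by_cases h1 : n ≤ 1
  · rw [PySem.List.pyRange_one_eq_nil (a := 0) (by omega),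
        PySem.List.pyRange_one_eq_nil (a := 1) (by omega)]
    simp
  · rw [foldA_eq, PySem.List.pyRange_one 0 (n - 1), PySem.List.pyRange_one 1 n]
    have hm0 : (n - 1 - 0).toNat = (n - 1).toNat := by omega
    rw [hm0]
    have hA := phi_eq ext (n - 1).toNat 0 (by omega)
    rw [suf_zero] at hA
    rw [show (List.range (n - 1).toNat).map (fun k : Nat => (0 : Int) + (k : Int))
          = (List.range (n - 1).toNat).map (fun j : Nat => ((0 : Nat) : Int) + (j : Int)) by simp,
        hA]
    simp only [List.nil_append, List.cons_append, List.map_map, Function.comp_def]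
    congr 1
    apply List.map_congr_left
    intro j _
    simp only [Nat.zero_add]
    unfold pvSuf
    congr 2
    push_cast
    ring
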